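-- pv_equiv track=rewrite | github.com/tmeteorj/ncbi-analysis | src/analysis/gene_similarity_match.py | update_regex
-- ===== SOURCE A (Python) =====
-- def update_regex(pattern: str):
--     up_pattern = ''
--     pattern = pattern.lower()
--     for c in pattern:
--         if c == 'c':
--             up_pattern += '(c|t)'
--         else:
--             up_pattern += c
--     return up_pattern
-- ===== SOURCE B (Python) =====
-- def update_regex(pattern: str):
--     # staged split/join: cut the lowercased pattern into the segments between
--     # 'c' occurrences, then glue them back with the alternation as separator
--     return '(c|t)'.join(pattern.lower().split('c'))
-- ===== Notes on version B (the rewrite author's own statement) =====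
-- stated objective: simpler
-- what changed: Replaced the per-character scan with conditional accumulator by a split-then-join decomposition: cut the lowercased string at every 'c' and intercalate the segments with '(c|t)'.
import Mathlib
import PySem

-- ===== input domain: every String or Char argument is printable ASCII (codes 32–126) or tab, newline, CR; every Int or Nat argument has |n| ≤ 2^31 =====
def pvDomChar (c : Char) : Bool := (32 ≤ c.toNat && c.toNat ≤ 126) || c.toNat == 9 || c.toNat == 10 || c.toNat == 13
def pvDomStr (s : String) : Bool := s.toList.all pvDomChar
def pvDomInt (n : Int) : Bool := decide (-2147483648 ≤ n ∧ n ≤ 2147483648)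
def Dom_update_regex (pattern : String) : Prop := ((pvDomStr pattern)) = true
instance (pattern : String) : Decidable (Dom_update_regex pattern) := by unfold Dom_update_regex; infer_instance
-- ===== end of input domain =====

-- B replaces A's per-character scan with a split-then-join decomposition (objective: simpler).

-- ===== PORT A =====
-- literal port of A: lowercase, then fold over the characters appending '(c|t)' for 'c', the char otherwise
def update_regex (pattern : String) : String :=
  String.ofList ((PySem.Str.lower pattern).toList.foldl (fun acc c => acc ++ (if c = 'c' then ['(','c','|','t',')'] else [c])) [])

-- ===== PORT B =====
-- literal port of B: split the lowercased pattern at 'c', join the segments with '(c|t)'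
def update_regex_alt (pattern : String) : String :=
  String.ofList (PySem.Chars.join "(c|t)".toList
    (PySem.Chars.splitOn (PySem.Str.lower pattern).toList ['c']))

-- ===== PRECONDITION & SPEC =====
def Spec_update_regex (pattern : String) (out : String) : Prop := out = update_regex_alt pattern
instance (pattern : String) (out : String) : Decidable (Spec_update_regex pattern out) := by unfold Spec_update_regex; infer_instance

-- ===== CLAIM (what is proved, stated in full; the proofs are below) =====
def Claim_equal_update_regex : Prop := ∀ (pattern : String), Dom_update_regex pattern → Spec_update_regex pattern (update_regex pattern)

-- ===== LEMMAS AND PROOFS =====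

-- the segments of l between occurrences of o, the first one prefixed by pre
def pvSegs (o : Char) (pre l : List Char) : List (List Char) :=
  match l with
  | [] => [pre]
  | c :: rest => if c = o then pre :: pvSegs o [] rest else pvSegs o (pre ++ [c]) rest

theorem pvSegs_ne_nil (o : Char) (pre l : List Char) : pvSegs o pre l ≠ [] := by
  induction l generalizing pre with
  | nil => simp [pvSegs]
  | cons c rest ih =>
    simp only [pvSegs]
    split_ifs <;> simp [ih]

-- splitOn.go with a single-char separator produces acc.reverse followed by the segments
theorem splitOn_go_eq (o : Char) : ∀ (fuel : Nat) (l cur : List Char) (acc : List (List Char)),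
    l.length ≤ fuel →
    PySem.Chars.splitOn.go [o] fuel l cur acc = acc.reverse ++ pvSegs o cur.reverse l := by
  intro fuel
  induction fuel with
  | zero =>
    intro l cur acc h
    have : l = [] := List.eq_nil_of_length_eq_zero (Nat.le_zero.mp h)
    subst this
    simp [PySem.Chars.splitOn.go, pvSegs]
  | succ n ih =>
    intro l cur acc h
    cases l with
    | nil => simp [PySem.Chars.splitOn.go, pvSegs]
    | cons c rest =>
      by_cases hc : c = o
      · subst hc
        have h1 : PySem.Chars.splitOn.go [c] (n+1) (c :: rest) cur acc
            = PySem.Chars.splitOn.go [c] n rest [] (cur.reverse :: acc) := by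
          simp [PySem.Chars.splitOn.go, List.isPrefixOf]
        rw [h1, ih rest [] _ (by simpa using Nat.le_of_succ_le_succ h)]
        simp [pvSegs]
      · have hp : ([o].isPrefixOf (c :: rest)) = false := by
          simp only [List.isPrefixOf, Bool.and_eq_false_iff, beq_eq_false_iff_ne]
          exact Or.inl fun h => hc h.symm
        have h1 : PySem.Chars.splitOn.go [o] (n+1) (c :: rest) cur acc
            = PySem.Chars.splitOn.go [o] n rest (c :: cur) acc := by
          simp [PySem.Chars.splitOn.go, hp]
        rw [h1, ih rest (c :: cur) acc (by simpa using Nat.le_of_succ_le_succ h)]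
        simp [pvSegs, hc]

theorem splitOn_single (o : Char) (l : List Char) :
    PySem.Chars.splitOn l [o] = pvSegs o [] l := by
  unfold PySem.Chars.splitOn
  rw [splitOn_go_eq o (l.length + 1) l [] [] (by omega)]
  simp

-- joining the segments with ins is the per-character substitution
theorem join_segs (o : Char) (ins : List Char) : ∀ (l pre : List Char),
    PySem.Chars.join ins (pvSegs o pre l)
      = pre ++ l.flatMap (fun c => if c = o then ins else [c]) := by
  intro l
  induction l with
  | nil => intro pre; simp [pvSegs, PySem.Chars.join, List.intercalate]
  | cons c rest ih =>
    intro pre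
    by_cases hc : c = o
    · simp only [pvSegs, if_pos hc]
      obtain ⟨q, t, hqt⟩ : ∃ q t, pvSegs o ([] : List Char) rest = q :: t := by
        cases hs : pvSegs o ([] : List Char) rest with
        | nil => exact absurd hs (pvSegs_ne_nil o [] rest)
        | cons q t => exact ⟨q, t, rfl⟩
      have : PySem.Chars.join ins (pre :: q :: t) = pre ++ ins ++ PySem.Chars.join ins (q :: t) := by
        simp [PySem.Chars.join, List.intercalate, List.intersperse]
      rw [hqt, this, ← hqt, ih]
      simp [List.flatMap_cons, if_pos hc]
    · simp only [pvSegs, if_neg hc]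
      rw [ih]
      simp [List.flatMap_cons, hc]

theorem foldl_app_chars (f : Char → List Char) : ∀ (l acc : List Char),
    l.foldl (fun acc c => acc ++ f c) acc = acc ++ l.flatMap f := by
  intro l
  induction l with
  | nil => simp
  | cons c t ih => intro acc; simp [ih]

-- ===== VERDICT (by name: the statement is the Claim_ definition above) =====
theorem update_regex_spec : Claim_equal_update_regex := by
  intro pattern _
  unfold Spec_update_regex update_regex update_regex_alt
  rw [splitOn_single, join_segs, foldl_app_chars]
  simp only [List.nil_append]
  have h : "(c|t)".toList = ['(', 'c', '|', 't', ')'] := rfl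
  rw [h]
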